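-- pv_equiv track=rewrite | github.com/skreynolds/uta_cse_1309x | assignment_3/find_word_vertical.py | find_word_vertical
-- ===== SOURCE A (Python) =====
-- def find_word_vertical(crossword, word):
--
--     col = 0
--     transpose_cross = [list(L) for L in zip(*crossword)]
--
--     for L in transpose_cross:
--         string = ''.join(L)
--         if word in string:
--             row = string.find(word)
--             return [row, col]
--         col += 1
--     return None
-- ===== SOURCE B (Python) =====
-- def find_word_vertical(crossword, word):
--     if not crossword:
--         return None
--     ncols = len(crossword[0])
--     for row in crossword:
--         ncols = min(ncols, len(row))
--     # single row-major pass: accumulate every column's characters in buckets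
--     cols = [[] for _ in range(ncols)]
--     for row in crossword:
--         cols = [buf + list(cell) for buf, cell in zip(cols, row)]
--     w = list(word)
--     m = len(w)
--     for c in range(ncols):
--         s = cols[c]
--         for start in range(len(s) - m + 1):
--             if all(s[start + k] == w[k] for k in range(m)):
--                 return [start, c]
--     return None
-- ===== Notes on version B (the rewrite author's own statement) =====
-- stated objective: alternative
-- what changed: B replaces A's zip-transpose plus per-column 'in'/str.find scans with a single row-major pass that accumulates each column's characters into buckets, then an explicit sliding-window match loop (all start positions, char-by-char comparison) that returns the first matching (start, col).
import Mathlib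
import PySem

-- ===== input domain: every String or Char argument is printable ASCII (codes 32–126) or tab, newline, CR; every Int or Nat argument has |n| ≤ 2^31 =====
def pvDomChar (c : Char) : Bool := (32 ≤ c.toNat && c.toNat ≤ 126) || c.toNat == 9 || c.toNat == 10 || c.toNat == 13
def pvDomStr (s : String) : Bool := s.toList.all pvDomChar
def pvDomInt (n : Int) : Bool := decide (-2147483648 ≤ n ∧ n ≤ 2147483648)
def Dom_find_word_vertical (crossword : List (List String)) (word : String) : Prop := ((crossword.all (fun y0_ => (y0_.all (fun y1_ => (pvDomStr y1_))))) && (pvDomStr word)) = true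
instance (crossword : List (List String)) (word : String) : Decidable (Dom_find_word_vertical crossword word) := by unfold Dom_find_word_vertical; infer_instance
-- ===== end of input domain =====

-- B replaces the zip-transpose and the 'in'/find scans by a row-major bucket pass plus
-- an explicit sliding-window character-match loop (objective: alternative).

-- ===== PORT A =====
-- zip(*crossword): repeatedly take the heads of all rows until some row runs out.
-- Fuel = length of the first row (an upper bound on the number of steps).
def pvZipStarAux : Nat → List (List String) → List (List String)
  | 0, _ => []
  | n + 1, rows =>
    if rows.isEmpty then []
    else if rows.any (·.isEmpty) then []
    else (rows.map (fun r => r.headD "")) :: pvZipStarAux n (rows.map List.tail)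

def pvZipStar (rows : List (List String)) : List (List String) :=
  pvZipStarAux (rows.headD []).length rows

-- the 'for L in transpose_cross' loop with the running 'col' counter
def pvALoop (word : String) : List (List String) → Int → Option (List Int)
  | [], _ => none
  | L :: rest, col =>
    let string := PySem.Str.join "" L
    if PySem.Str.isIn word string then some [PySem.Str.find string word, col]
    else pvALoop word rest (col + 1)

def find_word_vertical (crossword : List (List String)) (word : String) : Option (List Int) :=
  pvALoop word (pvZipStar crossword) 0

-- ===== PORT B =====
-- one step of the row-major bucket pass: cols = [buf + list(cell) for buf, cell in zip(cols, row)]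
def pvStep (cols : List (List Char)) (row : List String) : List (List Char) :=
  List.zipWith (fun buf cell => buf ++ cell.toList) cols row

-- all(s[start+k] == w[k] for k in range(m)); indices are in range in B's loops, so the
-- getD defaults are never used.
def pvMatch (s w : List Char) (start : Nat) : Bool :=
  (List.range w.length).all (fun k => s.getD (start + k) ' ' == w.getD k ' ')

-- the 'for start in range(len(s) - m + 1)' loop
def pvSearchCol (s w : List Char) : List Nat → Option Nat
  | [] => none
  | st :: rest => if pvMatch s w st then some st else pvSearchCol s w rest

-- the 'for c in range(ncols)' loop
def pvColsLoop (cols : List (List Char)) (w : List Char) : List Nat → Option (List Int)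
  | [] => none
  | c :: rest =>
    let s := cols.getD c []
    match pvSearchCol s w (List.range (s.length + 1 - w.length)) with
    | some st => some [(st : Int), (c : Int)]
    | none => pvColsLoop cols w rest

def find_word_vertical_alt (crossword : List (List String)) (word : String) : Option (List Int) :=
  match crossword with
  | [] => none
  | r :: _ =>
    let ncols := crossword.foldl (fun m row => min m row.length) r.length
    let cols := crossword.foldl pvStep (List.replicate ncols [])
    pvColsLoop cols word.toList (List.range ncols)

-- ===== PRECONDITION & SPEC =====
def Spec_find_word_vertical (crossword : List (List String)) (word : String) (out : Option (List Int)) : Prop := out = find_word_vertical_alt crossword word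
instance (crossword : List (List String)) (word : String) (out : Option (List Int)) : Decidable (Spec_find_word_vertical crossword word out) := by unfold Spec_find_word_vertical; infer_instance

-- ===== CLAIM (what is proved, stated in full; the proofs are below) =====
def Claim_equal_find_word_vertical : Prop := ∀ (crossword : List (List String)) (word : String), Dom_find_word_vertical crossword word → Spec_find_word_vertical crossword word (find_word_vertical crossword word)

-- ===== LEMMAS AND PROOFS =====

def pvMinLen : List (List String) → Nat
  | [] => 0
  | r :: rs => rs.foldl (fun m r' => min m r'.length) r.length

theorem pvFold_min_le (rs : List (List String)) (a : Nat) :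
    rs.foldl (fun m r' => min m r'.length) a ≤ a ∧
    ∀ r ∈ rs, rs.foldl (fun m r' => min m r'.length) a ≤ r.length := by
  induction rs generalizing a with
  | nil => simp
  | cons x xs ih =>
    refine ⟨le_trans (ih (min a x.length)).1 (by omega), ?_⟩
    intro r hr
    rcases List.mem_cons.mp hr with h | h
    · subst h; exact le_trans (ih (min a r.length)).1 (by omega)
    · exact (ih (min a x.length)).2 r h

theorem pvMinLen_le (rows : List (List String)) (r : List String) (h : r ∈ rows) :
    pvMinLen rows ≤ r.length := by
  cases rows with
  | nil => cases h
  | cons x xs =>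
    rcases List.mem_cons.mp h with h | h
    · subst h; exact (pvFold_min_le xs r.length).1
    · exact (pvFold_min_le xs x.length).2 r h

theorem pvMinLen_pos (rows : List (List String)) (hne : rows ≠ [])
    (h : ∀ r ∈ rows, r ≠ []) : 1 ≤ pvMinLen rows := by
  cases rows with
  | nil => simp at hne
  | cons x xs =>
    show 1 ≤ xs.foldl (fun m r' => min m r'.length) x.length
    have hx : 1 ≤ x.length := List.length_pos_iff.mpr (h x (by simp))
    clear hne
    have : ∀ (l : List (List String)) (a : Nat), 1 ≤ a → (∀ r ∈ l, r ≠ []) →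
        1 ≤ l.foldl (fun m r' => min m r'.length) a := by
      intro l
      induction l with
      | nil => intro a ha _; simpa using ha
      | cons y ys ih =>
        intro a ha hy
        have : 1 ≤ y.length := List.length_pos_iff.mpr (hy y (by simp))
        exact ih (min a y.length) (by omega) (fun r hr => hy r (by simp [hr]))
    exact this xs x.length hx (fun r hr => h r (by simp [hr]))

theorem pvMinLen_tail (rows : List (List String)) (h : ∀ r ∈ rows, r ≠ []) :
    pvMinLen (rows.map List.tail) = pvMinLen rows - 1 := by
  cases rows with
  | nil => simp [pvMinLen]
  | cons x xs =>
    show (xs.map List.tail).foldl (fun m r' => min m r'.length) x.tail.length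
        = xs.foldl (fun m r' => min m r'.length) x.length - 1
    have hx : 1 ≤ x.length := List.length_pos_iff.mpr (h x (by simp))
    have key : ∀ (l : List (List String)) (a : Nat), 1 ≤ a → (∀ r ∈ l, r ≠ []) →
        (l.map List.tail).foldl (fun m r' => min m r'.length) (a - 1)
          = l.foldl (fun m r' => min m r'.length) a - 1 := by
      intro l
      induction l with
      | nil => simp
      | cons y ys ih =>
        intro a ha hy
        have hy1 : 1 ≤ y.length := List.length_pos_iff.mpr (hy y (by simp))
        have : y.tail.length = y.length - 1 := by simp
        simp only [List.map_cons, List.foldl_cons, this]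
        rw [show min (a - 1) (y.length - 1) = min a y.length - 1 by omega]
        exact ih (min a y.length) (by omega) (fun r hr => hy r (by simp [hr]))
    have := key xs x.length hx (fun r hr => h r (by simp [hr]))
    simpa using this

theorem pvZipStarAux_eq (n : Nat) (rows : List (List String)) (h : pvMinLen rows ≤ n) :
    pvZipStarAux n rows
      = (List.range (pvMinLen rows)).map (fun j => rows.map (fun r => r.getD j "")) := by
  induction n generalizing rows with
  | zero =>
    have : pvMinLen rows = 0 := by omega
    simp [pvZipStarAux, this]
  | succ n ih =>
    by_cases hnil : rows = []
    · subst hnil; simp [pvZipStarAux, pvMinLen]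
    by_cases hemp : ∃ r ∈ rows, r = []
    · obtain ⟨r, hr, hre⟩ := hemp
      have hm0 : pvMinLen rows = 0 := by
        have := pvMinLen_le rows r hr; subst hre; simpa using this
      have hany : rows.any (·.isEmpty) = true := by
        simp only [List.any_eq_true]
        exact ⟨r, hr, by simp [hre]⟩
      simp [pvZipStarAux, hm0, hany, hnil]
    · push Not at hemp
      have hany : rows.any (·.isEmpty) = false := by
        simp only [List.any_eq_false]
        intro r hr; simpa using hemp r hr
      have hpos : 1 ≤ pvMinLen rows := pvMinLen_pos rows hnil hemp
      have htail : pvMinLen (rows.map List.tail) = pvMinLen rows - 1 := pvMinLen_tail rows hemp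
      rw [show pvMinLen rows = (pvMinLen rows - 1) + 1 by omega, List.range_succ_eq_map]
      simp only [pvZipStarAux, List.isEmpty_iff, hnil, if_false, hany, Bool.false_eq_true,
        if_false, List.map_cons, List.map_map]
      refine congrArg₂ List.cons ?_ ?_
      · apply List.map_congr_left
        intro r hr
        have := hemp r hr
        cases r with
        | nil => simp at this
        | cons c cs => simp
      · rw [ih (rows.map List.tail) (by omega), htail]
        apply List.map_congr_left
        intro j _
        simp only [Function.comp_apply, List.map_map]
        apply List.map_congr_left
        intro r hr
        have := hemp r hr
        cases r with
        | nil => simp at this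
        | cons c cs => simp [List.getD]

theorem pvZipStar_eq (rows : List (List String)) :
    pvZipStar rows
      = (List.range (pvMinLen rows)).map (fun j => rows.map (fun r => r.getD j "")) := by
  unfold pvZipStar
  cases rows with
  | nil => simp [pvZipStarAux, pvMinLen]
  | cons x xs =>
    exact pvZipStarAux_eq x.length (x :: xs) (pvMinLen_le (x :: xs) x (by simp))

-- the bucket pass computes exactly the column character lists
theorem pvBuckets (rows : List (List String)) (cols : List (List Char))
    (h : ∀ r ∈ rows, cols.length ≤ r.length) :
    (rows.foldl pvStep cols).length = cols.length ∧
    ∀ c < cols.length, (rows.foldl pvStep cols).getD c []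
      = cols.getD c [] ++ (rows.map (fun r => (r.getD c "").toList)).flatten := by
  induction rows generalizing cols with
  | nil => simp
  | cons r rs ih =>
    have hr : cols.length ≤ r.length := h r (by simp)
    have hstep_len : (pvStep cols r).length = cols.length := by
      simp [pvStep]; omega
    have hrs : ∀ r' ∈ rs, (pvStep cols r).length ≤ r'.length := by
      intro r' hr'; rw [hstep_len]; exact h r' (by simp [hr'])
    obtain ⟨hlen, hget⟩ := ih (pvStep cols r) hrs
    refine ⟨by simp only [List.foldl_cons]; rw [hlen, hstep_len], ?_⟩
    intro c hc
    have hc' : c < (pvStep cols r).length := by omega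
    have hcr : c < r.length := by omega
    have hstep_get : (pvStep cols r).getD c [] = cols.getD c [] ++ (r.getD c "").toList := by
      rw [List.getD_eq_getElem?_getD, List.getElem?_eq_getElem hc']
      simp [pvStep, List.getElem_zipWith, List.getD_eq_getElem?_getD,
        List.getElem?_eq_getElem hc, List.getElem?_eq_getElem hcr]
    simp only [List.foldl_cons]
    rw [hget c (by omega), hstep_get, List.map_cons, List.flatten_cons, List.append_assoc]

-- B's running-min ncols equals pvMinLen
theorem pvNcolsB_eq (r : List String) (rs : List (List String)) :
    (r :: rs).foldl (fun m row => min m row.length) r.length = pvMinLen (r :: rs) := by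
  simp [pvMinLen]

-- the explicit char-match test equals the prefix property (indices in range)
theorem pvMatch_iff (s w : List Char) (start : Nat) (h : start + w.length ≤ s.length) :
    pvMatch s w start = true ↔ w <+: s.drop start := by
  unfold pvMatch
  rw [List.all_eq_true]
  constructor
  · intro hall
    rw [List.prefix_iff_eq_take]
    apply List.ext_getElem
    · rw [List.length_take, List.length_drop]; omega
    · intro k hk1 hk2
      have hkm : k < w.length := hk1
      have := hall k (by simpa using hkm)
      rw [List.getElem_take, List.getElem_drop]
      have hsk : start + k < s.length := by omega
      rw [List.getD_eq_getElem s ' ' hsk, List.getD_eq_getElem w ' ' hkm] at this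
      exact (beq_iff_eq.mp this).symm
  · intro hpre k hk
    rw [List.mem_range] at hk
    have hsk : start + k < s.length := by omega
    rw [List.getD_eq_getElem s ' ' hsk, List.getD_eq_getElem w ' ' hk, beq_iff_eq]
    obtain ⟨tl, htl⟩ := hpre
    have hlt : k < (s.drop start).length := by rw [List.length_drop]; omega
    have hwk : (s.drop start)[k]'hlt = w[k] := by
      rw [List.getElem_of_eq htl.symm hlt, List.getElem_append_left hk]
    rw [← hwk, List.getElem_drop]

theorem pvSearch_none (s w : List Char) (t a : Nat)
    (h : ∀ i, a ≤ i → i < a + t → pvMatch s w i = false) :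
    pvSearchCol s w (List.range' a t) = none := by
  induction t generalizing a with
  | zero => simp [pvSearchCol]
  | succ t ih =>
    rw [List.range'_succ, pvSearchCol, h a (le_refl a) (by omega)]
    simp only [Bool.false_eq_true, if_false]
    exact ih (a + 1) (fun i h1 h2 => h i (by omega) (by omega))

theorem pvSearch_some (s w : List Char) (t a f : Nat) (ha : a ≤ f) (hf : f < a + t)
    (hm : pvMatch s w f = true) (hmin : ∀ i, a ≤ i → i < f → pvMatch s w i = false) :
    pvSearchCol s w (List.range' a t) = some f := by
  induction t generalizing a with
  | zero => omega
  | succ t ih =>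
    rw [List.range'_succ, pvSearchCol]
    by_cases hea : a = f
    · subst hea; simp [hm]
    · rw [hmin a (le_refl a) (by omega)]
      simp only [Bool.false_eq_true, if_false]
      exact ih (a + 1) (by omega) (by omega) (fun i h1 h2 => hmin i (by omega) h2)

theorem pvJoin_empty (css : List (List Char)) : PySem.Chars.join [] css = css.flatten := by
  induction css with
  | nil => simp [PySem.Chars.join, List.intercalate]
  | cons c cs ih =>
    cases cs with
    | nil => simp [PySem.Chars.join, List.intercalate, List.intersperse]
    | cons d ds =>
      have hstep : List.intercalate ([] : List Char) (c :: d :: ds)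
          = c ++ List.intercalate [] (d :: ds) := by
        simp [List.intercalate, List.intersperse]
      show List.intercalate [] (c :: d :: ds) = _
      rw [hstep, List.flatten_cons, ← ih]
      rfl

-- per-column: explicit sliding-window search vs isIn / find
theorem pvCol_case (s w : List Char) :
    (match pvSearchCol s w (List.range (s.length + 1 - w.length)) with
      | some st => some ((st : Int))
      | none => none)
      = (if PySem.Chars.isIn w s then some (PySem.Chars.find s w) else none) := by
  by_cases hin : PySem.Chars.isIn w s = true
  · have hnn : 0 ≤ PySem.Chars.find s w := (PySem.Chars.find_nonneg_iff s w).mpr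
      ((PySem.Chars.isIn_iff_infix w s).mp hin)
    obtain ⟨hpre, hmin⟩ := PySem.Chars.find_spec hnn
    set f := (PySem.Chars.find s w).toNat with hfdef
    have hflen : f + w.length ≤ s.length := by
      have := hpre.length_le
      rw [List.length_drop] at this
      have hfl : (f : Int) ≤ s.length := by
        rw [hfdef, Int.toNat_of_nonneg hnn]; exact PySem.Chars.find_le_length s w
      omega
    have hm : pvMatch s w f = true := (pvMatch_iff s w f hflen).mpr hpre
    have hminm : ∀ i, 0 ≤ i → i < f → pvMatch s w i = false := by
      intro i _ hi
      by_contra hcon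
      have : pvMatch s w i = true := by
        cases hcase : pvMatch s w i with
        | false => exact absurd hcase hcon
        | true => rfl
      exact hmin i hi ((pvMatch_iff s w i (by omega)).mp this)
    rw [List.range_eq_range']
    rw [pvSearch_some s w (s.length + 1 - w.length) 0 f (by omega) (by omega) hm hminm]
    simp only [hin, if_true]
    rw [hfdef, Int.toNat_of_nonneg hnn]
  · have hno : ¬ (∃ j, w <+: s.drop j) := by
      intro hcon
      exact hin ((PySem.Chars.exists_prefix_drop_iff_isIn w s).mp hcon)
    have hall : ∀ i, 0 ≤ i → i < 0 + (s.length + 1 - w.length) → pvMatch s w i = false := by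
      intro i _ hi
      cases hcase : pvMatch s w i with
      | false => rfl
      | true =>
        exact absurd ⟨i, (pvMatch_iff s w i (by omega)).mp hcase⟩ hno
    rw [List.range_eq_range', pvSearch_none s w _ 0 hall]
    simp [hin]

-- the two outer loops agree column by column
theorem pvLoops_eq (crossword : List (List String)) (word : String)
    (cols : List (List Char))
    (hcols : ∀ c < pvMinLen crossword, cols.getD c []
        = ((crossword.map (fun r => (r.getD c "").toList)).flatten))
    (t a : Nat) (hta : a + t ≤ pvMinLen crossword) :
    pvALoop word ((List.range' a t).map (fun j => crossword.map (fun r => r.getD j ""))) (a : Int)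
      = pvColsLoop cols word.toList (List.range' a t) := by
  induction t generalizing a with
  | zero => simp [pvALoop, pvColsLoop]
  | succ t ih =>
    rw [List.range'_succ]
    simp only [List.map_cons]
    rw [pvALoop, pvColsLoop]
    have hstr : (PySem.Str.join "" (crossword.map (fun r => r.getD a ""))).toList
        = cols.getD a [] := by
      rw [hcols a (by omega)]
      simp [PySem.Str.toList_join, pvJoin_empty, List.map_map, Function.comp_def]
    cases hsearch : pvSearchCol (cols.getD a []) word.toList
        (List.range ((cols.getD a []).length + 1 - word.toList.length)) with
    | some st =>
      have hcase := pvCol_case (cols.getD a []) word.toList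
      rw [hsearch] at hcase
      by_cases hin : PySem.Chars.isIn word.toList (cols.getD a []) = true
      · rw [if_pos hin] at hcase
        have hst : (st : Int) = PySem.Chars.find (cols.getD a []) word.toList := by
          simpa using hcase
        simp only [PySem.Str.isIn_eq, PySem.Str.find_eq, hstr, hin, if_true]
        rw [hst]
      · rw [if_neg hin] at hcase; simp at hcase
    | none =>
      have hcase := pvCol_case (cols.getD a []) word.toList
      rw [hsearch] at hcase
      by_cases hin : PySem.Chars.isIn word.toList (cols.getD a []) = true
      · rw [if_pos hin] at hcase; simp at hcase
      · simp only [PySem.Str.isIn_eq, PySem.Str.find_eq, hstr, hin, Bool.false_eq_true, if_false]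
        have := ih (a + 1) (by omega)
        push_cast at this ⊢
        exact this

-- ===== VERDICT (by name: the statement is the Claim_ definition above) =====
theorem find_word_vertical_spec : Claim_equal_find_word_vertical := by
  intro crossword word _
  unfold Spec_find_word_vertical find_word_vertical find_word_vertical_alt
  cases crossword with
  | nil => simp [pvZipStar, pvZipStarAux, pvALoop]
  | cons r rs =>
    rw [pvZipStar_eq]
    simp only
    rw [pvNcolsB_eq r rs]
    set cw := r :: rs with hcw
    have hlenle : ∀ r' ∈ cw, (List.replicate (pvMinLen cw) ([] : List Char)).length ≤ r'.length := by
      intro r' hr'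
      rw [List.length_replicate]
      exact pvMinLen_le cw r' hr'
    obtain ⟨_, hget⟩ := pvBuckets cw (List.replicate (pvMinLen cw) []) hlenle
    have hcols : ∀ c < pvMinLen cw,
        (cw.foldl pvStep (List.replicate (pvMinLen cw) [])).getD c []
          = ((cw.map (fun r' => (r'.getD c "").toList)).flatten) := by
      intro c hc
      rw [hget c (by rw [List.length_replicate]; exact hc)]
      simp
    rw [List.range_eq_range']
    exact pvLoops_eq cw word _ hcols (pvMinLen cw) 0 (by omega)
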